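-- pv_equiv track=rewrite | github.com/SidoJain/AOC-2024 | d25.py | parse_schematic
-- ===== SOURCE A (Python) =====
-- def parse_schematic(lines: list[str]) -> list[int]:
--     heights = []
--     max_height = len(lines) - 1
--
--     for col in range(len(lines[0])):
--         count = 0
--         is_lock = lines[0][col] == '#'
--
--         if is_lock:
--             last_hash = 0
--             for row in range(max_height + 1):
--                 if lines[row][col] == '#':
--                     last_hash = row
--             count = last_hash + 1
--         else:
--             first_hash = max_height
--             for row in range(max_height, -1, -1):
--                 if lines[row][col] == '#':
--                     first_hash = row
--             count = max_height - first_hash + 1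
--         heights.append(count)
--     return heights
-- ===== SOURCE B (Python) =====
-- def parse_schematic(lines: list[str]) -> list[int]:
--     max_height = len(lines) - 1
--     width = len(lines[0])
--     # per column: (row of last '#', row of first '#'); defaults (0, max_height)
--     ext = [(0, max_height)] * width
--     for row in range(len(lines)):
--         for col in range(width):
--             if lines[row][col] == '#':
--                 ext[col] = (row, min(ext[col][1], row))
--     return [ext[col][0] + 1 if lines[0][col] == '#' else max_height - ext[col][1] + 1
--             for col in range(width)]
-- ===== Notes on version B (the rewrite author's own statement) =====
-- stated objective: alternative
-- what changed: Replaces A's column-major scheme (two separate inner row loops per column, one ascending for locks and one descending for keys) by a single row-major pass that maintains per-column (last-hash-row, min-hash-row) extents in one array, then derives each height from the extents.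
import Mathlib
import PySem

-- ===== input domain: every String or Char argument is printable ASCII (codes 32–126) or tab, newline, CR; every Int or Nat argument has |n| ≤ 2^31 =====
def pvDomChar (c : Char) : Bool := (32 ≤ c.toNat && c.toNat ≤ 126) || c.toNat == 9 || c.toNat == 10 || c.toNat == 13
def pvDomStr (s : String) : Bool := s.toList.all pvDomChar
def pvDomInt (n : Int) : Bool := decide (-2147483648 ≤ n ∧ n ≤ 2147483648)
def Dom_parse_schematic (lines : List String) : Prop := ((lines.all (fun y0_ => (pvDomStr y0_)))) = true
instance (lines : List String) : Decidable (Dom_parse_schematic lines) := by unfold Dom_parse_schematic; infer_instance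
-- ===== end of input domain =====

-- B replaces A's column-major scheme (two direction-dependent inner row loops per column) by one
-- row-major pass maintaining per-column (last '#', first '#') extents; same cost, different traversal.

-- shared indexing helper: lines[row][col] (total; Pre_ keeps every use in range)
def pvGetc (lines : List String) (row col : Int) : Char :=
  (PySem.Str.pyGet? (PySem.List.pyGetD lines row "") col).getD ' '

-- ===== PORT A =====
def parse_schematic (lines : List String) : List Int :=
  let max_height : Int := (lines.length : Int) - 1
  (PySem.List.pyRange 0 (PySem.Str.len (PySem.List.pyGetD lines 0 "")) 1).foldl
    (fun heights col =>
      let is_lock := pvGetc lines 0 col == '#'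
      let count : Int :=
        if is_lock then
          ((PySem.List.pyRange 0 (max_height + 1) 1).foldl
            (fun last_hash row => if pvGetc lines row col == '#' then row else last_hash) 0) + 1
        else
          max_height - ((PySem.List.pyRange max_height (-1) (-1)).foldl
            (fun first_hash row => if pvGetc lines row col == '#' then row else first_hash) max_height) + 1
      heights ++ [count]) []

-- ===== PORT B =====
def parse_schematic_alt (lines : List String) : List Int :=
  let max_height : Int := (lines.length : Int) - 1
  let width : Int := PySem.Str.len (PySem.List.pyGetD lines 0 "")
  let ext : List (Int × Int) :=
    (PySem.List.pyRange 0 (lines.length : Int) 1).foldl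
      (fun e row =>
        (PySem.List.pyRange 0 width 1).foldl
          (fun e col =>
            if pvGetc lines row col == '#' then
              PySem.List.pySetD e col (row, min (PySem.List.pyGetD e col (0, 0)).2 row)
            else e) e)
      (List.replicate width.toNat (0, max_height))
  (PySem.List.pyRange 0 width 1).map
    (fun col =>
      if pvGetc lines 0 col == '#' then (PySem.List.pyGetD ext col (0, 0)).1 + 1
      else max_height - (PySem.List.pyGetD ext col (0, 0)).2 + 1)

-- ===== PRECONDITION & SPEC =====
-- Pre_ excludes exactly the inputs on which the Python A raises IndexError: the empty list
-- (lines[0]) and ragged inputs where some row is shorter than the first row.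
def Pre_parse_schematic (lines : List String) : Prop :=
  lines ≠ [] ∧ ∀ l ∈ lines, PySem.Str.len (PySem.List.pyGetD lines 0 "") ≤ PySem.Str.len l
instance (lines : List String) : Decidable (Pre_parse_schematic lines) := by
  unfold Pre_parse_schematic; infer_instance
def pvWitness_parse_schematic : List String := ["#.#", "#..", "..#"]
def Spec_parse_schematic (lines : List String) (out : List Int) : Prop := out = parse_schematic_alt lines
instance (lines : List String) (out : List Int) : Decidable (Spec_parse_schematic lines out) := by unfold Spec_parse_schematic; infer_instance

-- ===== CLAIM (what is proved, stated in full; the proofs are below) =====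
def Claim_equal_parse_schematic : Prop := ∀ (lines : List String), Dom_parse_schematic lines → Pre_parse_schematic lines → Spec_parse_schematic lines (parse_schematic lines)

-- ===== LEMMAS AND PROOFS =====

theorem pvSetD_eq_set {α : Type} (e : List α) (c : Int) (v : α) (h0 : 0 ≤ c)
    (h1 : c < (e.length : Int)) : PySem.List.pySetD e c v = e.set c.toNat v := by
  simp [PySem.List.pySetD, PySem.List.pySet?, PySem.List.pyIdx?, h0, h1]

theorem pvSetD_length {α : Type} (e : List α) (c : Int) (v : α) :
    (PySem.List.pySetD e c v).length = e.length := by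
  simp only [PySem.List.pySetD, PySem.List.pySet?, PySem.List.pyIdx?]
  split_ifs <;> simp

theorem pvGetD_set_self {α : Type} (e : List α) (c : Int) (v d : α) (h0 : 0 ≤ c)
    (h1 : c < (e.length : Int)) : PySem.List.pyGetD (e.set c.toNat v) c d = v := by
  rw [PySem.List.pyGetD_eq_getElem _ d h0 (by simpa using h1)]
  simp

theorem pvGetD_set_ne {α : Type} (e : List α) (c j : Int) (v d : α) (hc0 : 0 ≤ c) (hj0 : 0 ≤ j)
    (hne : j ≠ c) (hj : j < (e.length : Int)) :
    PySem.List.pyGetD (e.set c.toNat v) j d = PySem.List.pyGetD e j d := by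
  rw [PySem.List.pyGetD_eq_getElem _ d hj0 (by simpa using hj),
      PySem.List.pyGetD_eq_getElem _ d hj0 hj]
  rw [List.getElem_set_ne]
  omega

-- entry j of the per-row column loop of B
theorem pvColfold_getD (lines : List String) (row : Int) :
    ∀ (cs : List Int) (e : List (Int × Int)), cs.Nodup →
      (∀ c ∈ cs, 0 ≤ c ∧ c < (e.length : Int)) →
      ∀ j : Int, 0 ≤ j → j < (e.length : Int) →
      PySem.List.pyGetD
        (cs.foldl (fun e col =>
          if pvGetc lines row col == '#' then
            PySem.List.pySetD e col (row, min (PySem.List.pyGetD e col (0, 0)).2 row)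
          else e) e) j (0, 0)
      = if j ∈ cs ∧ pvGetc lines row j == '#' then
          (row, min (PySem.List.pyGetD e j (0, 0)).2 row)
        else PySem.List.pyGetD e j (0, 0) := by
  intro cs
  induction cs with
  | nil => intro e _ _ j _ _; simp
  | cons c cs ih =>
    intro e hnd hmem j hj0 hj
    have hc0 : 0 ≤ c := (hmem c (by simp)).1
    have hc1 : c < (e.length : Int) := (hmem c (by simp)).2
    simp only [List.foldl_cons]
    by_cases hpc : pvGetc lines row c == '#'
    · rw [if_pos hpc]
      have hlen : (PySem.List.pySetD e c (row, min (PySem.List.pyGetD e c (0, 0)).2 row)).length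
          = e.length := pvSetD_length _ _ _
      rw [ih _ hnd.of_cons (by intro x hx; rw [hlen]; exact hmem x (by simp [hx])) j hj0 (by rw [hlen]; exact hj)]
      rw [pvSetD_eq_set _ _ _ hc0 hc1]
      by_cases hjc : j = c
      · subst hjc
        have hjn : j ∉ cs := by
          have := hnd; rw [List.nodup_cons] at this; exact this.1
        rw [if_neg (by simp [hjn]), pvGetD_set_self _ _ _ _ hj0 hj]
        simp [hpc]
      · rw [pvGetD_set_ne _ _ _ _ _ hc0 hj0 hjc hj]
        by_cases hjcs : j ∈ cs ∧ pvGetc lines row j == '#'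
        · rw [if_pos hjcs, if_pos ⟨by simp [hjcs.1], hjcs.2⟩]
        · rw [if_neg hjcs, if_neg (by
            intro hcon
            exact hjcs ⟨by rcases List.mem_cons.mp hcon.1 with h | h; exact absurd h hjc; exact h, hcon.2⟩)]
    · rw [if_neg hpc]
      rw [ih _ hnd.of_cons (by intro x hx; exact hmem x (by simp [hx])) j hj0 hj]
      by_cases hjcs : j ∈ cs ∧ pvGetc lines row j == '#'
      · rw [if_pos hjcs, if_pos ⟨by simp [hjcs.1], hjcs.2⟩]
      · rw [if_neg hjcs, if_neg (by
          intro hcon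
          rcases List.mem_cons.mp hcon.1 with h | h
          · subst h; exact hpc hcon.2
          · exact hjcs ⟨h, hcon.2⟩)]

theorem pvColfold_length (lines : List String) (row : Int) :
    ∀ (cs : List Int) (e : List (Int × Int)),
      (cs.foldl (fun e col =>
        if pvGetc lines row col == '#' then
          PySem.List.pySetD e col (row, min (PySem.List.pyGetD e col (0, 0)).2 row)
        else e) e).length = e.length := by
  intro cs
  induction cs with
  | nil => intro e; rfl
  | cons c cs ih =>
    intro e
    simp only [List.foldl_cons]
    by_cases hpc : pvGetc lines row c == '#'
    · rw [if_pos hpc, ih, pvSetD_length]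
    · rw [if_neg hpc, ih]

-- entry j after the whole row-major pass of B is the per-column (last, min) fold
theorem pvRowsfold (lines : List String) (Wd : Int) (j : Int) (hj0 : 0 ≤ j) (hjW : j < Wd) :
    ∀ (rs : List Int) (e : List (Int × Int)), (e.length : Int) = Wd →
    PySem.List.pyGetD
      (rs.foldl (fun e row =>
        (PySem.List.pyRange 0 Wd 1).foldl (fun e col =>
          if pvGetc lines row col == '#' then
            PySem.List.pySetD e col (row, min (PySem.List.pyGetD e col (0, 0)).2 row)
          else e) e) e) j (0, 0)
    = rs.foldl (fun v row => if pvGetc lines row j == '#' then (row, min v.2 row) else v)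
        (PySem.List.pyGetD e j (0, 0)) := by
  intro rs
  induction rs with
  | nil => intro e _; rfl
  | cons r rs ih =>
    intro e hlen
    simp only [List.foldl_cons]
    rw [ih _ (by rw [pvColfold_length]; exact hlen)]
    rw [pvColfold_getD lines r _ _ (PySem.List.nodup_pyRange_one 0 Wd)
          (by intro c hc; rw [hlen]; simpa using (PySem.List.mem_pyRange_one.mp hc))
          j hj0 (by rw [hlen]; exact hjW)]
    have : j ∈ PySem.List.pyRange 0 Wd 1 := PySem.List.mem_pyRange_one.mpr ⟨hj0, hjW⟩
    by_cases hp : pvGetc lines r j == '#'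
    · rw [if_pos ⟨this, hp⟩, if_pos hp]
    · rw [if_neg (by intro h; exact hp h.2), if_neg hp]

-- a fold of the pair step is the pair of the two component folds
theorem pvFoldPair (p : Int → Bool) :
    ∀ (rs : List Int) (a b : Int),
    rs.foldl (fun v r => if p r then (r, min v.2 r) else v) (a, b)
    = (rs.foldl (fun x r => if p r then r else x) a,
       rs.foldl (fun y r => if p r then min y r else y) b) := by
  intro rs
  induction rs with
  | nil => intro a b; rfl
  | cons r rs ih =>
    intro a b
    by_cases hp : p r <;> simp [List.foldl_cons, hp, ih]

theorem pvFoldrIf (p : Int → Bool) :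
    ∀ (l : List Int) (d : Int),
    l.foldr (fun r a => if p r then r else a) d = (l.filter p).headD d := by
  intro l
  induction l with
  | nil => intro d; rfl
  | cons r l ih => intro d; by_cases hp : p r <;> simp [hp, ih]

theorem pvFoldlMinIf (p : Int → Bool) :
    ∀ (l : List Int) (d : Int),
    l.foldl (fun a r => if p r then min a r else a) d = (l.filter p).foldl min d := by
  intro l
  induction l with
  | nil => intro d; rfl
  | cons r l ih => intro d; by_cases hp : p r <;> simp [hp, ih]

theorem pvFoldlMinConst : ∀ (t : List Int) (a : Int), (∀ y ∈ t, a ≤ y) → t.foldl min a = a := by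
  intro t
  induction t with
  | nil => intro a _; rfl
  | cons y t ih =>
    intro a h
    simp only [List.foldl_cons]
    rw [min_eq_left (h y (by simp))]
    exact ih a (fun z hz => h z (by simp [hz]))

-- A's descending first-hash loop equals B's ascending running-min fold
theorem pvDescMin (p : Int → Bool) (n : Int) :
    (PySem.List.pyRange (n - 1) (-1) (-1)).foldl (fun a r => if p r then r else a) (n - 1)
    = (PySem.List.pyRange 0 n 1).foldl (fun a r => if p r then min a r else a) (n - 1) := by
  have h := PySem.List.pyRange_neg_one_eq_reverse (n - 1) (-1)
  rw [show (-1 : Int) + 1 = 0 from rfl, show n - 1 + 1 = n by ring] at h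
  rw [h, List.foldl_reverse, pvFoldrIf, pvFoldlMinIf]
  have hpw : ((PySem.List.pyRange 0 n 1).filter p).Pairwise (· < ·) :=
    (PySem.List.pairwise_lt_pyRange_one 0 n).sublist List.filter_sublist
  have hmem : ∀ x ∈ (PySem.List.pyRange 0 n 1).filter p, x < n := by
    intro x hx
    exact (PySem.List.mem_pyRange_one.mp (List.mem_of_mem_filter hx)).2
  cases hfl : (PySem.List.pyRange 0 n 1).filter p with
  | nil => rfl
  | cons x t =>
    rw [hfl] at hpw hmem
    simp only [List.headD_cons, List.foldl_cons]
    rw [min_eq_right (by have := hmem x (by simp); omega)]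
    exact (pvFoldlMinConst t x (fun y hy =>
      le_of_lt (List.rel_of_pairwise_cons hpw hy))).symm

theorem pvGetD_replicate {α : Type} (k : Nat) (x d : α) (j : Int) (hj0 : 0 ≤ j)
    (hj : j < (k : Int)) : PySem.List.pyGetD (List.replicate k x) j d = x := by
  rw [PySem.List.pyGetD_eq_getElem _ d hj0 (by simpa using hj)]
  simp

-- ===== VERDICT (by name: the statement is the Claim_ definition above) =====
theorem parse_schematic_spec : Claim_equal_parse_schematic := by
  intro lines _ _
  unfold Spec_parse_schematic
  simp only [parse_schematic, parse_schematic_alt]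
  rw [PySem.List.foldl_append_singleton_eq_map, List.nil_append]
  apply List.map_congr_left
  intro col hcol
  have hW : (0 : Int) ≤ PySem.Str.len (PySem.List.pyGetD lines 0 "") := by
    rw [PySem.Str.len_eq]; positivity
  obtain ⟨h0, h1⟩ := PySem.List.mem_pyRange_one.mp hcol
  rw [pvRowsfold lines _ col h0 h1 _ _
        (by rw [List.length_replicate]; omega)]
  rw [pvGetD_replicate _ _ _ col h0 (by omega)]
  rw [pvFoldPair (fun r => pvGetc lines r col == '#')]
  have hmh : (lines.length : Int) - 1 + 1 = (lines.length : Int) := by ring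
  by_cases hp : pvGetc lines 0 col == '#'
  · rw [if_pos hp, if_pos hp, hmh]
  · rw [if_neg hp, if_neg hp, pvDescMin (fun r => pvGetc lines r col == '#') (lines.length : Int)]
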